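-- pv_equiv track=rewrite | github.com/yangzhen1/17-Exam2 | src/problem1.py | problem1b
-- ===== SOURCE A (Python) =====
-- def is_prime(n):
--     """
--     What comes in:  An integer n >= 2.
--     What goes out:
--       -- Returns True if the given integer is prime,
--          else returns False.
--     Side effects:   None.
--     Examples:
--       -- is_prime(11) returns  True
--       -- is_prime(12) returns  False
--       -- is_prime(2)  returns  True
--     Note: The algorithm used here is simple and clear but slow.
--     """
--     for k in range(2, (n // 2) + 1):
--         if n % k == 0:
--             return False
--
--     return True
--
-- def problem1b(strings):
--     list = []
--     for k in range(len(strings)):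
--         if is_prime(len(strings[k])):
--             list += [strings[k]]
--     return list
--
--
--     """
--     What comes in:  A sequence of strings.  You may assume that each string
--       has length at least 2.
--     What goes out:
--       -- Returns a list of all the strings in the sequence
--            whose length is prime.
--     Side effects:   None.
--     Examples:
--       -- problem1b( ['hello', 'four', 'the', '1234567890', '1234567', 'six'] )
--               returns ['hello', 'the', '1234567', 'six']
--            since:
--              -- the lengths of those strings are prime (5, 3, 7, and 3,
--                   respectively)
--              -- the lengths of the other two strings are NOT prime
--                    (4 and 10, respectively)
--       -- See the test cases for more examples, or ASK YOUR INSTRUCTOR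
--            FOR HELP if this problem's specification is not clear to you.
--      """
-- ===== SOURCE B (Python) =====
-- def problem1b(strings):
--     if not strings:
--         return []
--     M = max(len(s) for s in strings)
--     prime = [True] * (M + 1)
--     for i in range(2, M + 1):
--         for j in range(i * 2, M + 1, i):
--             prime[j] = False
--     return [s for s in strings if prime[len(s)]]
-- ===== Notes on version B (the rewrite author's own statement) =====
-- stated objective: faster
-- what changed: Per-string trial division (O(len) divisions each) is replaced by one Eratosthenes-style sieve table up to the maximum length, then a single pass filtering by table lookup.
import Mathlib
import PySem

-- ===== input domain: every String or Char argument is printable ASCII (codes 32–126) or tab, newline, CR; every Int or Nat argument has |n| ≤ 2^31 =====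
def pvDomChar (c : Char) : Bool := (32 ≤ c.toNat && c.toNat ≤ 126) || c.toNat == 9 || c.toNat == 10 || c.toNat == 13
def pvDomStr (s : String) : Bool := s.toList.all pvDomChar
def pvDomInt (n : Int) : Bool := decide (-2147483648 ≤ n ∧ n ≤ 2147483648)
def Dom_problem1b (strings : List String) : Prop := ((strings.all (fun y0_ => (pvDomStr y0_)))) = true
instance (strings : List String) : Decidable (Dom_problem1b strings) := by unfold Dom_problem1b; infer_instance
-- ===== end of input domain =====

-- B replaces per-string trial division by one Eratosthenes-style sieve table over the maximum length, then filters by table lookup (return value only; neither version mutates its argument).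

-- ===== PORT A =====
-- is_prime's 'for k in range(2, n//2+1): if n % k == 0: return False' as structural recursion with early return
def isPrimeLoop (n : Int) : List Int → Bool
  | [] => true
  | k :: ks => if PySem.Int.mod n k = 0 then false else isPrimeLoop n ks

def is_prime (n : Int) : Bool :=
  isPrimeLoop n (PySem.List.pyRange 2 (PySem.Int.floordiv n 2 + 1) 1)

def problem1b (strings : List String) : List String :=
  (PySem.List.pyRange 0 (PySem.List.len strings) 1).foldl
    (fun acc k =>
      if is_prime (PySem.Str.len (PySem.List.pyGetD strings k "")) then
        acc ++ [PySem.List.pyGetD strings k ""]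
      else acc) []

-- ===== PORT B =====
-- inner loop 'for j in range(i*2, M+1, i): prime[j] = False' (every j here is ≥ 4 > 0, so j.toNat is exact)
def sieveInner (M : Int) (tbl : List Bool) (i : Int) : List Bool :=
  (PySem.List.pyRange (i * 2) (M + 1) i).foldl (fun t j => t.set j.toNat false) tbl

-- 'prime = [True]*(M+1); for i in range(2, M+1): …'
def sieveTable (M : Int) : List Bool :=
  (PySem.List.pyRange 2 (M + 1) 1).foldl (sieveInner M) (List.replicate (M + 1).toNat true)

def problem1b_alt (strings : List String) : List String :=
  if strings.isEmpty then []
  else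
    let M : Int := (PySem.List.max? (strings.map PySem.Str.len) (fun x => x)).getD 0
    let prime := sieveTable M
    strings.filter (fun s => PySem.List.pyGetD prime (PySem.Str.len s) true)

-- ===== PRECONDITION & SPEC =====
def Spec_problem1b (strings : List String) (out : List String) : Prop := out = problem1b_alt strings
instance (strings : List String) (out : List String) : Decidable (Spec_problem1b strings out) := by unfold Spec_problem1b; infer_instance

-- ===== CLAIM (what is proved, stated in full; the proofs are below) =====
def Claim_equal_problem1b : Prop := ∀ (strings : List String), Dom_problem1b strings → Spec_problem1b strings (problem1b strings)

-- ===== LEMMAS AND PROOFS =====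

theorem isPrimeLoop_eq_true_iff (n : Int) (L : List Int) :
    isPrimeLoop n L = true ↔ ∀ k ∈ L, PySem.Int.mod n k ≠ 0 := by
  induction L with
  | nil => simp [isPrimeLoop]
  | cons k ks ih =>
    simp only [isPrimeLoop, List.mem_cons]
    by_cases h : PySem.Int.mod n k = 0
    · simp [h]
    · simp [h, ih]

theorem is_prime_iff (n : Int) :
    is_prime n = true ↔ ∀ k : Int, 2 ≤ k → 2 * k ≤ n → ¬ (k ∣ n) := by
  rw [is_prime, isPrimeLoop_eq_true_iff]
  constructor
  · intro h k h2 hle hdvd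
    have hk : k ∈ PySem.List.pyRange 2 (PySem.Int.floordiv n 2 + 1) 1 := by
      rw [PySem.List.mem_pyRange_one]
      refine ⟨h2, ?_⟩
      have : k ≤ PySem.Int.floordiv n 2 :=
        (PySem.Int.le_floordiv_iff_mul_le (by norm_num)).2 (by omega)
      omega
    exact h k hk ((PySem.Int.mod_eq_zero_iff_dvd n k).2 hdvd)
  · intro h k hk hmod
    rw [PySem.List.mem_pyRange_one] at hk
    have hle : 2 * k ≤ n := by
      have h1 : k ≤ PySem.Int.floordiv n 2 := by omega
      have h2 := (PySem.Int.le_floordiv_iff_mul_le (b := 2) (a := n) (q := k) (by norm_num)).1 h1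
      omega
    exact h k hk.1 hle ((PySem.Int.mod_eq_zero_iff_dvd n k).1 hmod)

theorem length_foldl_set (L : List Int) (t : List Bool) :
    (L.foldl (fun t j => t.set j.toNat false) t).length = t.length := by
  induction L generalizing t with
  | nil => rfl
  | cons j L ih => simp [List.foldl_cons, ih, List.length_set]

theorem fs_preserve (L : List Int) (t : List Bool) (m : Nat) (h : t[m]? = some false) :
    (L.foldl (fun t j => t.set j.toNat false) t)[m]? = some false := by
  induction L generalizing t with
  | nil => exact h
  | cons j L ih =>
    refine ih _ ?_
    rw [List.getElem?_set]
    have hm : m < t.length := (List.getElem?_eq_some_iff.mp h).1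
    split_ifs with h1 h2
    · rfl
    · omega
    · exact h

theorem fs_hit (L : List Int) (t : List Bool) (m : Nat) (hm : m < t.length)
    (h : ∃ j ∈ L, j.toNat = m) :
    (L.foldl (fun t j => t.set j.toNat false) t)[m]? = some false := by
  induction L generalizing t with
  | nil => simp at h
  | cons j L ih =>
    rcases h with ⟨j', hj', hjm⟩
    rcases List.mem_cons.mp hj' with rfl | hj'
    · refine fs_preserve L _ m ?_
      rw [List.getElem?_set, if_pos hjm, if_pos (by omega)]
    · exact ih (t.set j.toNat false) (by simpa using hm) ⟨j', hj', hjm⟩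

theorem fs_miss (L : List Int) (t : List Bool) (m : Nat)
    (h : ¬ ∃ j ∈ L, j.toNat = m) :
    (L.foldl (fun t j => t.set j.toNat false) t)[m]? = t[m]? := by
  induction L generalizing t with
  | nil => rfl
  | cons j L ih =>
    rw [List.foldl_cons, ih _ (fun ⟨j', hj', hjm⟩ => h ⟨j', List.mem_cons_of_mem _ hj', hjm⟩),
      List.getElem?_set, if_neg (fun hjm => h ⟨j, List.mem_cons_self, hjm⟩)]

theorem length_sieveInner (M : Int) (t : List Bool) (i : Int) :
    (sieveInner M t i).length = t.length := length_foldl_set _ _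

theorem si_preserve (M : Int) (L : List Int) (t : List Bool) (m : Nat)
    (h : t[m]? = some false) :
    (L.foldl (sieveInner M) t)[m]? = some false := by
  induction L generalizing t with
  | nil => exact h
  | cons i L ih => exact ih _ (fs_preserve _ _ _ h)

theorem si_hit (M : Int) (L : List Int) (t : List Bool) (m : Nat) (hm : m < t.length)
    (h : ∃ i ∈ L, ∃ j ∈ PySem.List.pyRange (i * 2) (M + 1) i, j.toNat = m) :
    (L.foldl (sieveInner M) t)[m]? = some false := by
  induction L generalizing t with
  | nil => simp at h
  | cons i L ih =>
    rcases h with ⟨i', hi', hj⟩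
    rcases List.mem_cons.mp hi' with rfl | hi'
    · exact si_preserve M L _ m (fs_hit _ _ _ hm hj)
    · exact ih (sieveInner M t i) (by rw [length_sieveInner]; exact hm) ⟨i', hi', hj⟩

theorem si_miss (M : Int) (L : List Int) (t : List Bool) (m : Nat)
    (h : ¬ ∃ i ∈ L, ∃ j ∈ PySem.List.pyRange (i * 2) (M + 1) i, j.toNat = m) :
    (L.foldl (sieveInner M) t)[m]? = t[m]? := by
  induction L generalizing t with
  | nil => rfl
  | cons i L ih =>
    rw [List.foldl_cons, ih _ (fun ⟨i', hi', hj⟩ => h ⟨i', List.mem_cons_of_mem _ hi', hj⟩)]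
    exact fs_miss _ _ _ (fun hj => h ⟨i, List.mem_cons_self, hj⟩)

-- the sieve entry at index n is exactly A's trial-division verdict on n
theorem sieve_get (M : Int) (n : Nat) (h : (n : Int) ≤ M) :
    (sieveTable M)[n]? = some (is_prime (n : Int)) := by
  have hM : 0 ≤ M := le_trans (by exact_mod_cast Nat.zero_le n) h
  have hlen : n < (List.replicate (M + 1).toNat true).length := by
    rw [List.length_replicate]; omega
  have hiff : (∃ i ∈ PySem.List.pyRange 2 (M + 1) 1,
      ∃ j ∈ PySem.List.pyRange (i * 2) (M + 1) i, j.toNat = n) ↔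
      ∃ k : Int, 2 ≤ k ∧ 2 * k ≤ (n : Int) ∧ k ∣ (n : Int) := by
    constructor
    · rintro ⟨i, hi, j, hj, rfl⟩
      rw [PySem.List.mem_pyRange_one] at hi
      rw [PySem.List.mem_pyRange_iff_of_pos (by omega)] at hj
      obtain ⟨hj1, hj2, hj3⟩ := hj
      have hjn : (j.toNat : Int) = j := Int.toNat_of_nonneg (by omega)
      refine ⟨i, hi.1, by omega, ?_⟩
      rw [hjn]
      have hd : i ∣ j - i * 2 + i * 2 := dvd_add hj3 ⟨2, rfl⟩
      simpa using hd
    · rintro ⟨k, hk2, hkn, hkd⟩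
      refine ⟨k, ?_, (n : Int), ?_, by simp⟩
      · rw [PySem.List.mem_pyRange_one]; omega
      · rw [PySem.List.mem_pyRange_iff_of_pos (by omega)]
        exact ⟨by omega, by omega, dvd_sub hkd ⟨2, rfl⟩⟩
  unfold sieveTable
  by_cases hc : ∃ k : Int, 2 ≤ k ∧ 2 * k ≤ (n : Int) ∧ k ∣ (n : Int)
  · rw [si_hit M _ _ n hlen (hiff.2 hc)]
    cases hb : is_prime (n : Int) with
    | false => rfl
    | true =>
      obtain ⟨k, h1, h2, h3⟩ := hc
      exact absurd h3 ((is_prime_iff (n : Int)).1 hb k h1 h2)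
  · rw [si_miss M _ _ n (fun he => hc (hiff.1 he)),
      List.getElem?_replicate, if_pos (by simpa using hlen)]
    have hp : is_prime (n : Int) = true := by
      rw [is_prime_iff]
      intro k h1 h2 h3
      exact hc ⟨k, h1, h2, h3⟩
    rw [hp]

theorem problem1b_eq_filter (strings : List String) :
    problem1b strings = strings.filter (fun s => is_prime (PySem.Str.len s)) := by
  unfold problem1b
  rw [PySem.List.foldl_pyRange_zero_pyGetD strings ""
    (fun acc s => if is_prime (PySem.Str.len s) then acc ++ [s] else acc) []]
  rw [PySem.List.foldl_append_if (fun s => is_prime (PySem.Str.len s)) (fun s => s) strings []]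
  simp

-- ===== VERDICT (by name: the statement is the Claim_ definition above) =====
theorem problem1b_spec : Claim_equal_problem1b := by
  intro strings _
  unfold Spec_problem1b problem1b_alt
  rw [problem1b_eq_filter]
  cases strings with
  | nil => simp
  | cons s0 rest =>
    simp only [List.isEmpty_cons, if_neg (by simp : ¬ (false = true))]
    obtain ⟨m, hmax⟩ : ∃ m, PySem.List.max? ((s0 :: rest).map PySem.Str.len) (fun x => x) = some m := by
      cases hm : PySem.List.max? ((s0 :: rest).map PySem.Str.len) (fun x => x) with
      | none => exact absurd ((PySem.List.max?_eq_none_iff _ _).1 hm) (by simp)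
      | some m => exact ⟨m, rfl⟩
    rw [hmax]
    refine (List.filter_congr ?_).symm
    intro s hs
    have hle : PySem.Str.len s ≤ m :=
      PySem.List.max?_isMax hmax _ (List.mem_map_of_mem hs)
    rw [PySem.Str.len_eq] at hle ⊢
    rw [PySem.List.pyGetD_natCast, List.getD_eq_getElem?_getD,
      sieve_get ((Option.some m).getD 0) s.toList.length (by simpa using hle)]
    simp
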